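-- pv_equiv track=rewrite | github.com/pypi-data/pypi-mirror-385 | packages/piltext/piltext-0.5.0.tar.gz/piltext-0.5.0/piltext/ascii_art.py | _build_grid_line_with_borders
-- ===== SOURCE A (Python) =====
-- def _align_text(text: str, cell_w: int, h_align: str) -> str:
--     """
--     Align text horizontally within a cell.
--     """
--     text_truncated = text[:cell_w] if len(text) > cell_w else text
--     if h_align == "l":
--         return text_truncated.ljust(cell_w)
--     elif h_align == "r":
--         return text_truncated.rjust(cell_w)
--     else:
--         return text_truncated.center(cell_w)
--
-- def _build_grid_line_with_borders(
--     text: str,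
--     grid_row: list[str],
--     start_col: int,
--     end_col: int,
--     columns: int,
--     cell_width: int,
--     h_align: str = "m",
-- ) -> list[str]:
--     """
--     Build a single line of the grid with borders and aligned text.
--     Grid row is AFTER border removal. Each cell has cell_width chars.
--     For merged cells: |content | content | content|
--     Total visual width = num_cells * cell_width
--     Total content width = (num_cells * cell_width) - 2 (for the two border chars)
--     """
--     line_parts = []
--     chars_per_cell = cell_width - 2
--     num_merged = end_col - start_col + 1
--
--     if num_merged == 1:
--         for col in range(columns):
--             if col == start_col:
--                 current_cell = grid_row[col]
--                 left_border = current_cell[0]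
--                 right_border = current_cell[-1]
--                 aligned_text = _align_text(text, chars_per_cell, h_align)
--                 line_parts.append(left_border + aligned_text + right_border)
--             else:
--                 line_parts.append(grid_row[col])
--     else:
--         total_visual_width = num_merged * cell_width
--         total_content_width = total_visual_width - 2
--         aligned_text = _align_text(text, total_content_width, h_align)
--
--         text_idx = 0
--         for col in range(columns):
--             if col >= start_col and col <= end_col:
--                 if col == start_col:
--                     chunk_size = cell_width - 1
--                     chunk = aligned_text[text_idx : text_idx + chunk_size]
--                     if len(chunk) < chunk_size:
--                         chunk = chunk.ljust(chunk_size)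
--                     line_parts.append("|" + chunk)
--                     text_idx += chunk_size
--                 elif col == end_col:
--                     chunk_size = cell_width - 1
--                     chunk = aligned_text[text_idx : text_idx + chunk_size]
--                     if len(chunk) < chunk_size:
--                         chunk = chunk.ljust(chunk_size)
--                     line_parts.append(chunk + "|")
--                     text_idx += chunk_size
--                 else:
--                     chunk = aligned_text[text_idx : text_idx + cell_width]
--                     if len(chunk) < cell_width:
--                         chunk = chunk.ljust(cell_width)
--                     line_parts.append(chunk)
--                     text_idx += cell_width
--             else:
--                 line_parts.append(grid_row[col])
--
--     return line_parts
-- ===== SOURCE B (Python) =====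
-- def _align_text(text: str, cell_w: int, h_align: str) -> str:
--     text_truncated = text[:cell_w] if len(text) > cell_w else text
--     if h_align == "l":
--         return text_truncated.ljust(cell_w)
--     elif h_align == "r":
--         return text_truncated.rjust(cell_w)
--     else:
--         return text_truncated.center(cell_w)
--
--
-- def _build_grid_line_with_borders(
--     text,
--     grid_row,
--     start_col,
--     end_col,
--     columns,
--     cell_width,
--     h_align="m",
-- ):
--     num_merged = end_col - start_col + 1
--     if num_merged == 1:
--         return [
--             cell[0] + _align_text(text, cell_width - 2, h_align) + cell[-1]
--             if col == start_col
--             else cell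
--             for col, cell in zip(range(columns), grid_row)
--         ]
--     # The merged span rendered as one bordered string of width num_merged * cell_width;
--     # each merged column simply shows its cell_width-wide window of it.
--     merged = "|" + _align_text(text, num_merged * cell_width - 2, h_align) + "|"
--     return [
--         merged[(col - start_col) * cell_width : (col - start_col + 1) * cell_width]
--         if start_col <= col <= end_col
--         else grid_row[col]
--         for col in range(columns)
--     ]
-- ===== Notes on version B (the rewrite author's own statement) =====
-- stated objective: simpler
-- what changed: A walks every column with a running text cursor and four branches (start/end/middle/outside), padding each chunk defensively; B renders the merged span once as a single bordered string '|'+aligned+'|' of width num_merged*cell_width and each merged column just takes its cell_width-wide window of it by a closed-form slice, with no cursor, no per-chunk padding and no start/end special cases; the single-cell case becomes one comprehension over zip(range(columns), grid_row). …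
-- outside the precondition, e.g. on _build_grid_line_with_borders('ab', ['x'], -1, 1, 1, 3, 'l'): A returns ['ab '], B returns ['   ']; on _build_grid_line_with_borders('ab', ['x', 'y'], 0, 1, 2, 0, 'l'): A returns ['|', '|'], B returns ['', '']
import Mathlib
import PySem

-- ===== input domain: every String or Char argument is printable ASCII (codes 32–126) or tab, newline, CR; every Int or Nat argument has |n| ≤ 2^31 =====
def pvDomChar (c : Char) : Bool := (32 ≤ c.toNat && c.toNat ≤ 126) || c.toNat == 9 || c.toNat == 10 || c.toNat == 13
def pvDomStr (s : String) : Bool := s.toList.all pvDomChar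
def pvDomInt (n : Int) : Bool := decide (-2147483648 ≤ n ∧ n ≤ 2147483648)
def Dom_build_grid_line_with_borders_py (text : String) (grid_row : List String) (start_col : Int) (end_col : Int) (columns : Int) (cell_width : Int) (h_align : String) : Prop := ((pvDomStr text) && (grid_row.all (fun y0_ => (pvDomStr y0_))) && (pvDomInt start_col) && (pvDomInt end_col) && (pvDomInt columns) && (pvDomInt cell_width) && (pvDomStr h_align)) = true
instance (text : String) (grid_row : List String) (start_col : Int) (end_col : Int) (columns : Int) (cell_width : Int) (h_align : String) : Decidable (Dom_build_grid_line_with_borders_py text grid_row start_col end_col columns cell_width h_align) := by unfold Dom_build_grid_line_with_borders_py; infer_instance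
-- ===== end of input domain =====

-- B replaces A's running-cursor loop (four branches, per-chunk padding) by rendering the
-- merged span once as the bordered string '|'+aligned+'|' and letting each merged column
-- take its cell_width-wide window of it; equality of the RETURN value is proved on Pre_.

-- ===== PORT A =====
-- s.ljust(w) / s.rjust(w) (exact: pads with spaces up to w, never truncates)
def pyLjust (cs : List Char) (w : Int) : List Char := cs ++ List.replicate (w - cs.length).toNat ' '
def pyRjust (cs : List Char) (w : Int) : List Char := List.replicate (w - cs.length).toNat ' ' ++ cs
-- s.center(w): CPython's rule, left margin = marg//2 + (marg & width & 1) (exact; marg > 0 ⇒ w > 0)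
def pyCenter (cs : List Char) (w : Int) : List Char :=
  let m := (w - cs.length).toNat
  let left := m / 2 + (if m % 2 = 1 ∧ w.toNat % 2 = 1 then 1 else 0)
  List.replicate left ' ' ++ cs ++ List.replicate (m - left) ' '

-- _align_text (helper shared by A's and B's sources, identical in both)
def alignText (text : List Char) (cellW : Int) (hAlign : String) : List Char :=
  let tt := if cellW < (text.length : Int) then PySem.List.slice text none (some cellW) else text
  if hAlign = "l" then pyLjust tt cellW
  else if hAlign = "r" then pyRjust tt cellW
  else pyCenter tt cellW

def build_grid_line_with_borders_py (text : String) (grid_row : List String) (start_col : Int) (end_col : Int) (columns : Int) (cell_width : Int) (h_align : String) : List String :=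
  let chars_per_cell := cell_width - 2
  let num_merged := end_col - start_col + 1
  if num_merged = 1 then
    (PySem.List.pyRange 0 columns 1).foldl (fun line_parts col =>
      if col = start_col then
        let cell := (PySem.List.pyGet? grid_row col).getD ""
        let lb := (PySem.Str.pyGet? cell 0).getD ' '
        let rb := (PySem.Str.pyGet? cell (-1)).getD ' '
        let aligned := alignText text.toList chars_per_cell h_align
        line_parts ++ [String.ofList (lb :: (aligned ++ [rb]))]
      else line_parts ++ [(PySem.List.pyGet? grid_row col).getD ""]) []
  else
    let total_content_width := num_merged * cell_width - 2
    let aligned := alignText text.toList total_content_width h_align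
    ((PySem.List.pyRange 0 columns 1).foldl (fun (st : List String × Int) col =>
      if start_col ≤ col ∧ col ≤ end_col then
        if col = start_col then
          let chunk := PySem.List.slice aligned (some st.2) (some (st.2 + (cell_width - 1)))
          let chunk := if (chunk.length : Int) < cell_width - 1 then pyLjust chunk (cell_width - 1) else chunk
          (st.1 ++ [String.ofList ('|' :: chunk)], st.2 + (cell_width - 1))
        else if col = end_col then
          let chunk := PySem.List.slice aligned (some st.2) (some (st.2 + (cell_width - 1)))
          let chunk := if (chunk.length : Int) < cell_width - 1 then pyLjust chunk (cell_width - 1) else chunk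
          (st.1 ++ [String.ofList (chunk ++ ['|'])], st.2 + (cell_width - 1))
        else
          let chunk := PySem.List.slice aligned (some st.2) (some (st.2 + cell_width))
          let chunk := if (chunk.length : Int) < cell_width then pyLjust chunk cell_width else chunk
          (st.1 ++ [String.ofList chunk], st.2 + cell_width)
      else (st.1 ++ [(PySem.List.pyGet? grid_row col).getD ""], st.2)) ([], 0)).1

-- ===== PORT B =====
def build_grid_line_with_borders_py_alt (text : String) (grid_row : List String) (start_col : Int) (end_col : Int) (columns : Int) (cell_width : Int) (h_align : String) : List String :=
  let num_merged := end_col - start_col + 1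
  if num_merged = 1 then
    ((PySem.List.pyRange 0 columns 1).zip grid_row).map (fun p =>
      if p.1 = start_col then
        String.ofList (((PySem.Str.pyGet? p.2 0).getD ' ') ::
          (alignText text.toList (cell_width - 2) h_align ++ [(PySem.Str.pyGet? p.2 (-1)).getD ' ']))
      else p.2)
  else
    let merged := '|' :: (alignText text.toList (num_merged * cell_width - 2) h_align ++ ['|'])
    (PySem.List.pyRange 0 columns 1).map (fun col =>
      if start_col ≤ col ∧ col ≤ end_col then
        String.ofList (PySem.List.slice merged (some ((col - start_col) * cell_width)) (some ((col - start_col + 1) * cell_width)))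
      else (PySem.List.pyGet? grid_row col).getD "")

-- ===== PRECONDITION & SPEC =====
-- Pre_ excludes the inputs where A raises IndexError (a needed grid_row cell missing, or an
-- empty single target cell) and, in the merged case with a visible merged column, restricts to
-- the natural domain 0 ≤ start_col and 1 ≤ cell_width: outside it A still returns values shaped
-- by its per-column cursor offsets and negative slice bounds, which B's uniform windows do not mirror.
def Pre_build_grid_line_with_borders_py (text : String) (grid_row : List String) (start_col : Int) (end_col : Int) (columns : Int) (cell_width : Int) (h_align : String) : Prop :=
  if end_col = start_col then
    columns ≤ (grid_row.length : Int) ∧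
      (0 ≤ start_col → start_col < columns → grid_row.getD start_col.toNat "" ≠ "")
  else
    (columns ≤ (grid_row.length : Int) ∨
      (start_col ≤ (grid_row.length : Int) ∧ columns - 1 ≤ end_col)) ∧
    (min end_col (columns - 1) < max start_col 0 ∨ (0 ≤ start_col ∧ 1 ≤ cell_width))
instance (text : String) (grid_row : List String) (start_col : Int) (end_col : Int) (columns : Int) (cell_width : Int) (h_align : String) : Decidable (Pre_build_grid_line_with_borders_py text grid_row start_col end_col columns cell_width h_align) := by unfold Pre_build_grid_line_with_borders_py; infer_instance

def pvWitness_build_grid_line_with_borders_py : String × List String × Int × Int × Int × Int × String :=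
  ("hi", ["|aa|", "|bb|"], 0, 0, 2, 4, "l")

def Spec_build_grid_line_with_borders_py (text : String) (grid_row : List String) (start_col : Int) (end_col : Int) (columns : Int) (cell_width : Int) (h_align : String) (out : List String) : Prop := out = build_grid_line_with_borders_py_alt text grid_row start_col end_col columns cell_width h_align
instance (text : String) (grid_row : List String) (start_col : Int) (end_col : Int) (columns : Int) (cell_width : Int) (h_align : String) (out : List String) : Decidable (Spec_build_grid_line_with_borders_py text grid_row start_col end_col columns cell_width h_align out) := by unfold Spec_build_grid_line_with_borders_py; infer_instance

-- ===== CLAIM (what is proved, stated in full; the proofs are below) =====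
def Claim_equal_build_grid_line_with_borders_py : Prop := ∀ (text : String) (grid_row : List String) (start_col : Int) (end_col : Int) (columns : Int) (cell_width : Int) (h_align : String), Dom_build_grid_line_with_borders_py text grid_row start_col end_col columns cell_width h_align → Pre_build_grid_line_with_borders_py text grid_row start_col end_col columns cell_width h_align → Spec_build_grid_line_with_borders_py text grid_row start_col end_col columns cell_width h_align (build_grid_line_with_borders_py text grid_row start_col end_col columns cell_width h_align)

-- ===== LEMMAS AND PROOFS =====

-- helper of the characterisation of A's chunks (proof-side only)
def padChunk (chunk : List Char) (size : Int) : List Char :=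
  if (chunk.length : Int) < size then pyLjust chunk size else chunk

def pvOff (sc cw k : Int) : Int := k * cw - (if 0 ≤ sc ∧ 0 < k then 1 else 0)

def pvPiece (aligned : List Char) (sc ec cw col off : Int) : String :=
  if col = sc then String.ofList ('|' :: padChunk (PySem.List.slice aligned (some off) (some (off + (cw - 1)))) (cw - 1))
  else if col = ec then String.ofList (padChunk (PySem.List.slice aligned (some off) (some (off + (cw - 1)))) (cw - 1) ++ ['|'])
  else String.ofList (padChunk (PySem.List.slice aligned (some off) (some (off + cw))) cw)

def pvEntry (aligned : List Char) (gr : List String) (sc ec cw col : Int) : String :=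
  if sc ≤ col ∧ col ≤ ec then pvPiece aligned sc ec cw col (pvOff sc cw (col - max sc 0))
  else (PySem.List.pyGet? gr col).getD ""

def pvCnt (sc ec c : Int) : Int := max 0 (min c (ec + 1) - max sc 0)
def pvIdx (sc ec cw c : Int) : Int :=
  pvCnt sc ec c * cw - (if 0 ≤ sc ∧ sc < c ∧ sc ≤ ec then 1 else 0)
    - (if 0 ≤ ec ∧ ec < c ∧ sc ≤ ec then 1 else 0)

def pvFA (aligned : List Char) (gr : List String) (sc ec cw : Int) :
    (List String × Int) → Int → (List String × Int) := fun st col =>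
  if sc ≤ col ∧ col ≤ ec then
    if col = sc then
      (st.1 ++ [String.ofList ('|' :: padChunk (PySem.List.slice aligned (some st.2) (some (st.2 + (cw - 1)))) (cw - 1))], st.2 + (cw - 1))
    else if col = ec then
      (st.1 ++ [String.ofList (padChunk (PySem.List.slice aligned (some st.2) (some (st.2 + (cw - 1)))) (cw - 1) ++ ['|'])], st.2 + (cw - 1))
    else
      (st.1 ++ [String.ofList (padChunk (PySem.List.slice aligned (some st.2) (some (st.2 + cw))) cw)], st.2 + cw)
  else (st.1 ++ [(PySem.List.pyGet? gr col).getD ""], st.2)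

theorem pvIdx_zero (sc ec cw : Int) : pvIdx sc ec cw 0 = 0 := by
  unfold pvIdx pvCnt
  have h1 : max 0 (min 0 (ec + 1) - max sc 0) = 0 := by omega
  rw [h1]
  split_ifs <;> omega

theorem pvFA_step (aligned : List Char) (gr : List String) (sc ec cw : Int) (hne : ec ≠ sc) (c : Int)
    (hc : 0 ≤ c) (parts : List String) :
    pvFA aligned gr sc ec cw (parts, pvIdx sc ec cw c) c
      = (parts ++ [pvEntry aligned gr sc ec cw c], pvIdx sc ec cw (c + 1)) := by
  by_cases hreg : sc ≤ c ∧ c ≤ ec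
  · have hoff : pvIdx sc ec cw c = pvOff sc cw (c - max sc 0) := by
      unfold pvIdx pvCnt pvOff
      have e1 : max 0 (min c (ec + 1) - max sc 0) = c - max sc 0 := by omega
      have e2 : (if 0 ≤ ec ∧ ec < c ∧ sc ≤ ec then (1:Int) else 0) = 0 := by
        split_ifs with h <;> omega
      have e3 : (if 0 ≤ sc ∧ sc < c ∧ sc ≤ ec then (1:Int) else 0)
          = (if 0 ≤ sc ∧ 0 < c - max sc 0 then (1:Int) else 0) := by
        split_ifs with h h' <;> omega
      rw [e1, e2, e3]; ring
    by_cases hs : c = sc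
    · have hupd : pvIdx sc ec cw (c + 1) = pvIdx sc ec cw c + (cw - 1) := by
        unfold pvIdx pvCnt
        have e1 : max 0 (min (c+1) (ec + 1) - max sc 0) = max 0 (min c (ec + 1) - max sc 0) + 1 := by omega
        have e2 : (if 0 ≤ sc ∧ sc < c + 1 ∧ sc ≤ ec then (1:Int) else 0) = 1 := by
          split_ifs with h <;> omega
        have e3 : (if 0 ≤ sc ∧ sc < c ∧ sc ≤ ec then (1:Int) else 0) = 0 := by
          split_ifs with h <;> omega
        have e4 : (if 0 ≤ ec ∧ ec < c + 1 ∧ sc ≤ ec then (1:Int) else 0)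
            = (if 0 ≤ ec ∧ ec < c ∧ sc ≤ ec then (1:Int) else 0) := by
          split_ifs with h h' <;> omega
        rw [e1, e2, e3, e4]; ring
      simp only [pvFA, pvEntry, pvPiece]
      rw [hupd, ← hoff]
      split_ifs <;> rfl
    · by_cases he : c = ec
      · have hupd : pvIdx sc ec cw (c + 1) = pvIdx sc ec cw c + (cw - 1) := by
          unfold pvIdx pvCnt
          have e1 : max 0 (min (c+1) (ec + 1) - max sc 0) = max 0 (min c (ec + 1) - max sc 0) + 1 := by omega
          have e2 : (if 0 ≤ sc ∧ sc < c + 1 ∧ sc ≤ ec then (1:Int) else 0)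
              = (if 0 ≤ sc ∧ sc < c ∧ sc ≤ ec then (1:Int) else 0) := by
            split_ifs with h h' <;> omega
          have e3 : (if 0 ≤ ec ∧ ec < c + 1 ∧ sc ≤ ec then (1:Int) else 0)
              = (if 0 ≤ ec ∧ ec < c ∧ sc ≤ ec then (1:Int) else 0) + 1 := by
            split_ifs with h h' <;> omega
          rw [e1, e2, e3]; ring
        simp only [pvFA, pvEntry, pvPiece]
        rw [hupd, ← hoff]
        split_ifs <;> rfl
      · have hupd : pvIdx sc ec cw (c + 1) = pvIdx sc ec cw c + cw := by
          unfold pvIdx pvCnt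
          have e1 : max 0 (min (c+1) (ec + 1) - max sc 0) = max 0 (min c (ec + 1) - max sc 0) + 1 := by omega
          have e2 : (if 0 ≤ sc ∧ sc < c + 1 ∧ sc ≤ ec then (1:Int) else 0)
              = (if 0 ≤ sc ∧ sc < c ∧ sc ≤ ec then (1:Int) else 0) := by
            split_ifs with h h' <;> omega
          have e3 : (if 0 ≤ ec ∧ ec < c + 1 ∧ sc ≤ ec then (1:Int) else 0)
              = (if 0 ≤ ec ∧ ec < c ∧ sc ≤ ec then (1:Int) else 0) := by
            split_ifs with h h' <;> omega
          rw [e1, e2, e3]; ring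
        simp only [pvFA, pvEntry, pvPiece]
        rw [hupd, ← hoff]
        split_ifs <;> rfl
  · have hupd : pvIdx sc ec cw (c + 1) = pvIdx sc ec cw c := by
      unfold pvIdx pvCnt
      have e1 : max 0 (min (c+1) (ec + 1) - max sc 0) = max 0 (min c (ec + 1) - max sc 0) := by omega
      have e2 : (if 0 ≤ sc ∧ sc < c + 1 ∧ sc ≤ ec then (1:Int) else 0)
          = (if 0 ≤ sc ∧ sc < c ∧ sc ≤ ec then (1:Int) else 0) := by
        split_ifs with h h' <;> omega
      have e3 : (if 0 ≤ ec ∧ ec < c + 1 ∧ sc ≤ ec then (1:Int) else 0)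
          = (if 0 ≤ ec ∧ ec < c ∧ sc ≤ ec then (1:Int) else 0) := by
        split_ifs with h h' <;> omega
      rw [e1, e2, e3]
    simp only [pvFA, pvEntry]
    rw [hupd]
    split_ifs <;> rfl

theorem pvFA_fold (aligned : List Char) (gr : List String) (sc ec cw : Int) (hne : ec ≠ sc)
    (k : Nat) : ∀ (c : Nat) (parts : List String),
    ((List.range' c k).map (fun i => Int.ofNat i)).foldl (pvFA aligned gr sc ec cw) (parts, pvIdx sc ec cw c)
      = (parts ++ (List.range' c k).map (fun i => pvEntry aligned gr sc ec cw (Int.ofNat i)),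
         pvIdx sc ec cw (c + k)) := by
  induction k with
  | zero => intro c parts; simp
  | succ k ih =>
    intro c parts
    simp only [Int.ofNat_eq_natCast] at ih ⊢
    simp only [List.range'_succ, List.map_cons, List.foldl_cons]
    rw [pvFA_step aligned gr sc ec cw hne (c : Int) (by positivity) parts]
    have h1 : ((c : Int) + 1) = ((c + 1 : Nat) : Int) := by push_cast; ring
    rw [h1, ih (c + 1) (parts ++ [pvEntry aligned gr sc ec cw (c : Int)])]
    have h2 : ((c + 1 : Nat) : Int) + (k : Int) = (c : Int) + ((k : Nat) + 1 : Nat) := by push_cast; ring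
    rw [h2]
    simp

theorem pvRange_nonpos (cols : Int) (h : cols ≤ 0) : PySem.List.pyRange 0 cols 1 = [] := by
  simp [PySem.List.pyRange]
  omega

theorem pvRange_toNat (cols : Int) (h : 0 ≤ cols) :
    PySem.List.pyRange 0 cols 1 = (List.range cols.toNat).map (fun i => Int.ofNat i) := by
  conv_lhs => rw [show cols = ((cols.toNat : Nat) : Int) by omega]
  rw [PySem.List.pyRange_zero_natCast]
  simp [Int.ofNat_eq_natCast]

theorem A_merged_eq (text : String) (gr : List String) (sc ec cols cw : Int) (ha : String)
    (hne : ¬ (ec - sc + 1 = 1)) :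
    build_grid_line_with_borders_py text gr sc ec cols cw ha
      = (List.range cols.toNat).map
          (fun i => pvEntry (alignText text.toList ((ec - sc + 1) * cw - 2) ha) gr sc ec cw (Int.ofNat i)) := by
  have hne' : ec ≠ sc := by omega
  by_cases hc : 0 ≤ cols
  · unfold build_grid_line_with_borders_py
    rw [if_neg hne, pvRange_toNat cols hc]
    have h0 : (([], (0:Int)) : List String × Int) = ([], pvIdx sc ec cw ((0:Nat) : Int)) := by
      rw [show (((0:Nat):Int)) = (0:Int) by simp, pvIdx_zero]
    rw [h0]
    show (((List.range cols.toNat).map (fun i => Int.ofNat i)).foldl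
        (pvFA (alignText text.toList ((ec - sc + 1) * cw - 2) ha) gr sc ec cw)
        ([], pvIdx sc ec cw ((0:Nat):Int))).1 = _
    rw [show List.range cols.toNat = List.range' 0 cols.toNat from List.range_eq_range']
    rw [pvFA_fold (alignText text.toList ((ec - sc + 1) * cw - 2) ha) gr sc ec cw hne' cols.toNat 0 []]
    simp
  · unfold build_grid_line_with_borders_py
    rw [if_neg hne, pvRange_nonpos cols (by omega)]
    rw [show cols.toNat = 0 by omega]
    rfl

def pvSEntry (text : String) (gr : List String) (sc cw : Int) (ha : String) (col : Int) : String :=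
  if col = sc then
    String.ofList (((PySem.Str.pyGet? ((PySem.List.pyGet? gr col).getD "") 0).getD ' ') ::
      (alignText text.toList (cw - 2) ha ++ [(PySem.Str.pyGet? ((PySem.List.pyGet? gr col).getD "") (-1)).getD ' ']))
  else (PySem.List.pyGet? gr col).getD ""

theorem A_single_eq (text : String) (gr : List String) (sc ec cols cw : Int) (ha : String)
    (hne : ec - sc + 1 = 1) :
    build_grid_line_with_borders_py text gr sc ec cols cw ha
      = (List.range cols.toNat).map (fun i => pvSEntry text gr sc cw ha (Int.ofNat i)) := by
  by_cases hc : 0 ≤ cols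
  · unfold build_grid_line_with_borders_py
    rw [if_pos hne, pvRange_toNat cols hc]
    have hl : (fun (line_parts : List String) (col : Int) =>
        if col = sc then
          ((fun cell =>
            line_parts ++ [String.ofList (((PySem.Str.pyGet? cell 0).getD ' ') ::
              (alignText text.toList (cw - 2) ha ++ [(PySem.Str.pyGet? cell (-1)).getD ' ']))])
            ((PySem.List.pyGet? gr col).getD ""))
        else line_parts ++ [(PySem.List.pyGet? gr col).getD ""])
        = fun (acc : List String) (col : Int) => acc ++ [pvSEntry text gr sc cw ha col] := by
      funext acc col
      unfold pvSEntry
      split_ifs <;> rfl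
    show (((List.range cols.toNat).map (fun i => Int.ofNat i)).foldl
      (fun (line_parts : List String) (col : Int) =>
        if col = sc then
          ((fun cell =>
            line_parts ++ [String.ofList (((PySem.Str.pyGet? cell 0).getD ' ') ::
              (alignText text.toList (cw - 2) ha ++ [(PySem.Str.pyGet? cell (-1)).getD ' ']))])
            ((PySem.List.pyGet? gr col).getD ""))
        else line_parts ++ [(PySem.List.pyGet? gr col).getD ""]) []) = _
    rw [hl, PySem.List.foldl_append_singleton_eq_map]
    simp [List.map_map, Function.comp]
  · unfold build_grid_line_with_borders_py
    rw [if_pos hne, pvRange_nonpos cols (by omega), show cols.toNat = 0 by omega]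
    rfl

-- length facts for the pad helpers and _align_text
theorem pyLjust_length (cs : List Char) (w : Int) (h : (cs.length : Int) ≤ w) :
    ((pyLjust cs w).length : Int) = w := by
  simp [pyLjust]; omega

theorem pyRjust_length (cs : List Char) (w : Int) (h : (cs.length : Int) ≤ w) :
    ((pyRjust cs w).length : Int) = w := by
  simp [pyRjust]; omega

theorem pyCenter_length (cs : List Char) (w : Int) (h : (cs.length : Int) ≤ w) :
    ((pyCenter cs w).length : Int) = w := by
  simp [pyCenter]
  split_ifs <;> omega

theorem alignText_length (t : List Char) (w : Int) (ha : String) (h : 0 ≤ w) :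
    ((alignText t w ha).length : Int) = w := by
  unfold alignText
  by_cases hc : w < (t.length : Int)
  · rw [if_pos hc, PySem.List.slice_to t h]
    have hlen : (((t.take w.toNat).length : Nat) : Int) ≤ w := by
      simp [List.length_take]; omega
    split_ifs
    · exact pyLjust_length _ _ hlen
    · exact pyRjust_length _ _ hlen
    · exact pyCenter_length _ _ hlen
  · rw [if_neg hc]
    have hlen : ((t.length : Nat) : Int) ≤ w := by omega
    split_ifs
    · exact pyLjust_length _ _ hlen
    · exact pyRjust_length _ _ hlen
    · exact pyCenter_length _ _ hlen

-- the heart of the proof: inside the merged span, A's cursor chunk at column col is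
-- exactly B's cell_width-wide window of '|' ++ aligned ++ '|'
theorem pvPiece_eq_window (L : List Char) (sc ec cw col : Int)
    (hsc : 0 ≤ sc) (hcw : 1 ≤ cw) (hse : sc < ec)
    (hL : (L.length : Int) = (ec - sc + 1) * cw - 2)
    (h1 : sc ≤ col) (h2 : col ≤ ec) :
    pvPiece L sc ec cw col (pvOff sc cw (col - max sc 0))
      = String.ofList (PySem.List.slice ('|' :: (L ++ ['|'])) (some ((col - sc) * cw)) (some ((col - sc + 1) * cw))) := by
  have hmax : max sc 0 = sc := by omega
  rw [hmax]
  have hj0 : 0 ≤ col - sc := by omega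
  have hp0 : (0:Int) ≤ (col - sc) * cw := mul_nonneg hj0 (by omega)
  have hp1 : (0:Int) ≤ (col - sc + 1) * cw := mul_nonneg (by omega) (by omega)
  rw [PySem.List.slice_toNat _ hp0 hp1]
  -- linearise the products so omega can reason about lengths
  have hsplit : (ec - sc + 1) * cw = (col - sc) * cw + (ec - col) * cw + cw := by ring
  have hstep : (col - sc + 1) * cw = (col - sc) * cw + cw := by ring
  have hq0 : (0:Int) ≤ (ec - col) * cw := mul_nonneg (by omega) (by omega)
  by_cases hcs : col = sc
  · -- first merged column: '|' plus the first cw-1 chars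
    unfold pvPiece pvOff
    rw [if_pos hcs]
    have hoff : (col - sc) * cw - (if 0 ≤ sc ∧ 0 < col - sc then (1:Int) else 0) = 0 := by
      rw [if_neg (by omega)]; rw [hcs]; ring
    rw [hoff]
    have hcw1 : (0:Int) ≤ cw - 1 := by omega
    rw [show (0:Int) + (cw - 1) = cw - 1 by ring, PySem.List.slice_toNat _ le_rfl hcw1]
    simp only [List.drop_zero, Int.toNat_zero, Nat.sub_zero]
    have hqc : cw ≤ (ec - col) * cw := le_mul_of_one_le_left (by omega) (by omega)
    have hlen : (cw - 1).toNat ≤ L.length := by omega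
    have hnopad : padChunk (L.take (cw - 1).toNat) (cw - 1) = L.take (cw - 1).toNat := by
      unfold padChunk
      rw [if_neg]
      simp [List.length_take]
      omega
    rw [hnopad]
    congr 1
    have hz : (col - sc) * cw = 0 := by rw [hcs]; ring
    have e0 : ((col - sc) * cw).toNat = 0 := by omega
    have e1 : ((col - sc + 1) * cw).toNat = (cw - 1).toNat + 1 := by omega
    rw [e0]
    simp only [Nat.sub_zero, List.drop_zero]
    rw [e1, List.take_succ_cons, List.take_append_of_le_length hlen]
  · by_cases hce : col = ec
    · -- last merged column: last cw-1 chars plus '|'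
      unfold pvPiece pvOff
      rw [if_neg hcs, if_pos hce]
      rw [if_pos (show (0:Int) ≤ sc ∧ 0 < col - sc by omega)]
      set off := (col - sc) * cw - 1 with hoffdef
      have hoff0 : 0 ≤ off := by
        have : cw ≤ (col - sc) * cw := le_mul_of_one_le_left (by omega) (by omega)
        omega
      rw [show off + (cw - 1) = off + (cw - 1) by rfl, PySem.List.slice_toNat _ hoff0 (by omega)]
      have hLoff : L.length - off.toNat = (cw - 1).toNat := by
        have : (ec - col) * cw = 0 := by rw [hce]; ring
        omega
      have htake : (L.drop off.toNat).take ((off + (cw - 1)).toNat - off.toNat) = L.drop off.toNat := by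
        apply List.take_of_length_le
        simp [List.length_drop]
        omega
      rw [htake]
      have hnopad : padChunk (L.drop off.toNat) (cw - 1) = L.drop off.toNat := by
        unfold padChunk
        rw [if_neg]
        simp [List.length_drop]
        omega
      rw [hnopad]
      congr 1
      have e0 : ((col - sc) * cw).toNat = off.toNat + 1 := by omega
      rw [e0, List.drop_succ_cons, List.drop_append]
      have e1 : off.toNat - L.length = 0 := by omega
      rw [e1, List.drop_zero]
      refine (List.take_of_length_le ?_).symm
      simp [List.length_drop]
      omega
    · -- middle merged column: a full cw-wide window
      unfold pvPiece pvOff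
      rw [if_neg hcs, if_neg hce]
      rw [if_pos (show (0:Int) ≤ sc ∧ 0 < col - sc by omega)]
      set off := (col - sc) * cw - 1 with hoffdef
      have hoff0 : 0 ≤ off := by
        have : cw ≤ (col - sc) * cw := le_mul_of_one_le_left (by omega) (by omega)
        omega
      rw [PySem.List.slice_toNat _ hoff0 (by omega)]
      have hroom : off.toNat + cw.toNat ≤ L.length := by
        have : cw ≤ (ec - col) * cw := le_mul_of_one_le_left (by omega) (by omega)
        omega
      have htk : (off + cw).toNat - off.toNat = cw.toNat := by omega
      rw [htk]
      have hnopad : padChunk ((L.drop off.toNat).take cw.toNat) cw = (L.drop off.toNat).take cw.toNat := by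
        unfold padChunk
        rw [if_neg]
        simp [List.length_take, List.length_drop]
        omega
      rw [hnopad]
      congr 1
      have e0 : ((col - sc) * cw).toNat = off.toNat + 1 := by omega
      have e1 : ((col - sc + 1) * cw).toNat - ((col - sc) * cw).toNat = cw.toNat := by omega
      rw [e0, List.drop_succ_cons, List.drop_append]
      have e2 : off.toNat - L.length = 0 := by omega
      rw [e2, List.drop_zero,
        show ((col - sc + 1) * cw).toNat - (off.toNat + 1) = cw.toNat by omega]
      rw [List.take_append_of_le_length (by simp [List.length_drop]; omega)]
-- ===== VERDICT (by name: the statement is the Claim_ definition above) =====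
theorem build_grid_line_with_borders_py_spec : Claim_equal_build_grid_line_with_borders_py := by
  intro text gr sc ec cols cw ha hdom hpre
  unfold Spec_build_grid_line_with_borders_py
  unfold Pre_build_grid_line_with_borders_py at hpre
  simp only [build_grid_line_with_borders_py_alt]
  by_cases hm : ec - sc + 1 = 1
  · -- single-cell case
    have hes : ec = sc := by omega
    rw [A_single_eq text gr sc ec cols cw ha hm]
    rw [if_pos hes] at hpre
    rw [if_pos hm]
    obtain ⟨hL, _⟩ := hpre
    by_cases hc : 0 ≤ cols
    · rw [pvRange_toNat cols hc]
      apply List.ext_getElem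
      · simp
        omega
      · intro i h1 h2
        simp only [List.getElem_map, List.getElem_range, List.getElem_zip]
        have hi : i < gr.length := by
          simp at h2
          omega
        have hcell : (PySem.List.pyGet? gr (Int.ofNat i)).getD "" = gr[i] := by
          simp only [Int.ofNat_eq_natCast, PySem.List.pyGet?_natCast]
          rw [List.getElem?_eq_getElem hi]
          rfl
        unfold pvSEntry
        simp only [hcell]
    · rw [pvRange_nonpos cols (by omega), show cols.toNat = 0 by omega]
      rfl
  · -- merged case
    rw [A_merged_eq text gr sc ec cols cw ha hm]
    rw [if_neg (show ¬ ec = sc by omega)] at hpre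
    rw [if_neg hm]
    obtain ⟨_, hnat⟩ := hpre
    by_cases hc : 0 ≤ cols
    · rw [pvRange_toNat cols hc, List.map_map]
      apply List.map_congr_left
      intro i hi
      simp only [List.mem_range] at hi
      simp only [Function.comp]
      unfold pvEntry
      by_cases hreg : sc ≤ (Int.ofNat i) ∧ (Int.ofNat i) ≤ ec
      · rw [if_pos hreg, if_pos hreg]
        -- a merged column is visible, so Pre_ gives the natural-domain bounds
        have hvis : ¬ (min ec (cols - 1) < max sc 0) := by
          simp only [Int.ofNat_eq_natCast] at hreg
          omega
        obtain ⟨hsc, hcw⟩ := hnat.resolve_left hvis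
        exact pvPiece_eq_window _ sc ec cw _ hsc hcw (by simp only [Int.ofNat_eq_natCast] at hreg; omega)
          (alignText_length text.toList ((ec - sc + 1) * cw - 2) ha (by
            have h2le : 2 ≤ ec - sc + 1 := by
              simp only [Int.ofNat_eq_natCast] at hreg
              omega
            nlinarith))
          hreg.1 hreg.2
      · rw [if_neg hreg, if_neg hreg]
    · rw [pvRange_nonpos cols (by omega), show cols.toNat = 0 by omega]
      rfl
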